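-- pv_equiv track=rewrite | github.com/FalkoHof/meNOGG-excercise | lib/functional_group.py | process_tax_prot_ids
-- ===== SOURCE A (Python) =====
-- from collections import defaultdict
--
-- def process_tax_prot_ids(tax_prot_ids):
--     """Function that takes a list of ["taxid1.protein_id1", ..] and splits
--     the string it the first dot. Returns a tuple of set(tax_ids),
--     set(protein_ids), dict{tax_id,set(protein_ids)}
--     """
--     #initilze some objects to hold data
--     tax_prot_dict = defaultdict(set)
--     tax_ids = set()
--     prot_ids = set()
--     #iterate over all functional group members and process them
--     for i in tax_prot_ids:
--         #split only at the first . as some ids contain dots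
--         tax_id, prot_id = i.split('.', 1)
--         tax_ids.add(tax_id)
--         prot_ids.add(prot_id)
--         tax_prot_dict[tax_id].add(prot_id)
--     return tax_ids, prot_ids, tax_prot_dict
-- ===== SOURCE B (Python) =====
-- from collections import defaultdict
--
-- def process_tax_prot_ids(tax_prot_ids):
--     """Group-by with per-key scans: split once, dedup the tax ids, then build
--     each tax id's protein set by its own scan over the pairs; the two sets
--     are read off afterwards (keys of the dict / all second components)."""
--     pairs = [i.split('.', 1) for i in tax_prot_ids]
--     tax_prot_dict = defaultdict(set)
--     for tax_id in dict.fromkeys(t for t, _ in pairs):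
--         tax_prot_dict[tax_id] = {p for t, p in pairs if t == tax_id}
--     tax_ids = set(tax_prot_dict)
--     prot_ids = {p for _, p in pairs}
--     return tax_ids, prot_ids, tax_prot_dict
-- ===== Notes on version B (the rewrite author's own statement) =====
-- stated objective: alternative
-- what changed: B replaces A's single incremental pass (three accumulators updated per element) with a staged group-by: split all ids once, dedup the tax ids, and build each tax id's protein set by its own scan over the pairs; the two sets are then read off (dict keys / all second components) instead of being maintained in the loop.
-- outside the precondition, e.g. on process_tax_prot_ids(['nodot']): A raises ValueError, B raises ValueError
import Mathlib
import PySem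

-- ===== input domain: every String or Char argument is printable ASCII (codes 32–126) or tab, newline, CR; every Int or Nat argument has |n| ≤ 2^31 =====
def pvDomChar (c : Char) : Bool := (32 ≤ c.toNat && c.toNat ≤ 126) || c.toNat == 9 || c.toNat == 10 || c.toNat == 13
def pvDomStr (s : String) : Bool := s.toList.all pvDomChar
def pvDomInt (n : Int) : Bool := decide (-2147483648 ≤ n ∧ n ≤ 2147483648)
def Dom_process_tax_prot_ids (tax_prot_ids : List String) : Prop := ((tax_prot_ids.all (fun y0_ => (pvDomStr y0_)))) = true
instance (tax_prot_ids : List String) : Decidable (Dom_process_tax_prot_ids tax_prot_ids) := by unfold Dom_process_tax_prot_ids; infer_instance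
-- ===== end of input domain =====

-- B restructures A into a staged group-by: split all ids once, dedup the tax ids, and
-- build each tax id's protein set by its own scan over the pairs; the two sets are read
-- off afterwards. Same values; objective: alternative algorithm (k scans vs one pass).

-- ===== PORT A =====
-- one loop step of A: split at the first '.', add to both sets and to the defaultdict
def pvStepA (st : List String × List String × PySem.Dict String (List String)) (i : String) :
    List String × List String × PySem.Dict String (List String) :=
  match PySem.Str.splitMax? i "." 1 with
  | some [tax_id, prot_id] =>
      (PySem.Set.add st.1 tax_id,
       PySem.Set.add st.2.1 prot_id,
       st.2.2.insert tax_id (PySem.Set.add (st.2.2.getD tax_id []) prot_id))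
  | _ => st  -- a string without '.' raises in Python: outside Pre_

def process_tax_prot_ids (tax_prot_ids : List String) :
    List String × List String × (List (String × List String)) :=
  let st := tax_prot_ids.foldl pvStepA ([], [], PySem.Dict.empty)
  (st.1, st.2.1, PySem.Dict.items st.2.2)

-- ===== PORT B =====
-- `t` of a split pair (B's generator `t for t, _ in pairs`; unpacking a non-pair raises: outside Pre_)
def pvFst? (pr : List String) : Option String :=
  match pr with
  | [tax_id, _] => some tax_id
  | _ => none

-- `p` of a split pair (B's comprehension `p for _, p in pairs`)
def pvSnd? (pr : List String) : Option String :=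
  match pr with
  | [_, prot_id] => some prot_id
  | _ => none

-- B's inner comprehension filter: `p for t, p in pairs if t == tax_id`
def pvSel (tax_id : String) (pr : List String) : Option String :=
  match pr with
  | [t, p] => if t = tax_id then some p else none
  | _ => none

def process_tax_prot_ids_alt (tax_prot_ids : List String) :
    List String × List String × (List (String × List String)) :=
  let pairs := tax_prot_ids.map (fun i => (PySem.Str.splitMax? i "." 1).getD [])
  let taxes := PySem.List.dedup (pairs.filterMap pvFst?)
  let tax_prot_dict := taxes.foldl
    (fun d t => d.insert t (PySem.Set.ofList (pairs.filterMap (pvSel t)))) PySem.Dict.empty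
  let tax_ids := PySem.Dict.keys tax_prot_dict
  let prot_ids := PySem.Set.ofList (pairs.filterMap pvSnd?)
  (tax_ids, prot_ids, PySem.Dict.items tax_prot_dict)

-- ===== PRECONDITION & SPEC =====
-- Pre_ excludes ids without a '.': there `i.split('.', 1)` yields one piece and A's
-- tuple unpacking raises ValueError (B raises too).
def Pre_process_tax_prot_ids (tax_prot_ids : List String) : Prop :=
  ∀ s ∈ tax_prot_ids, PySem.Str.isIn "." s = true
instance (tax_prot_ids : List String) : Decidable (Pre_process_tax_prot_ids tax_prot_ids) := by
  unfold Pre_process_tax_prot_ids; infer_instance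

def pvWitness_process_tax_prot_ids : List String := ["1.a", "2.b", "1.c.x", "1.a"]

def Spec_process_tax_prot_ids (tax_prot_ids : List String)
    (out : List String × List String × (List (String × List String))) : Prop :=
  out = process_tax_prot_ids_alt tax_prot_ids
instance (tax_prot_ids : List String) (out : List String × List String × (List (String × List String))) :
    Decidable (Spec_process_tax_prot_ids tax_prot_ids out) := by
  unfold Spec_process_tax_prot_ids; infer_instance

-- ===== CLAIM (what is proved, stated in full; the proofs are below) =====
def Claim_equal_process_tax_prot_ids : Prop :=
  ∀ (tax_prot_ids : List String), Dom_process_tax_prot_ids tax_prot_ids →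
    Pre_process_tax_prot_ids tax_prot_ids →
      Spec_process_tax_prot_ids tax_prot_ids (process_tax_prot_ids tax_prot_ids)

-- ===== LEMMAS AND PROOFS =====

-- proof-only helper: the dict part of A's loop step, on an already-split pair
def pvStepDict (d : PySem.Dict String (List String)) (pr : List String) :
    PySem.Dict String (List String) :=
  match pr with
  | [tax_id, prot_id] => d.insert tax_id (PySem.Set.add (d.getD tax_id []) prot_id)
  | _ => d

-- the keys of the dict after one step of A's loop
theorem pv_keys_stepDict (d : PySem.Dict String (List String)) (pr : List String) :
    (pvStepDict d pr).keys = (match pr with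
      | [tax_id, _] => PySem.Set.add d.keys tax_id
      | _ => d.keys) := by
  match pr with
  | [] => rfl
  | [_] => rfl
  | t :: p :: q :: r => rfl
  | [t, p] =>
      simp only [pvStepDict, PySem.Set.add]
      by_cases h : d.contains t = true
      · rw [PySem.Dict.keys_insert_of_contains _ _ h]
        rw [PySem.Dict.contains_eq_decide_mem_keys] at h
        simp only [PySem.Set.contains] at *
        simp at *
        simp [h]
      · have h' : d.contains t = false := by simpa using h
        rw [PySem.Dict.keys_insert_of_not_contains _ _ h']
        rw [PySem.Dict.contains_eq_decide_mem_keys] at h'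
        simp only [PySem.Set.contains] at *
        simp at h'
        simp [h']

-- invariant for A: the fold from (keys d, p, d) tracks keys/prot-set/dict of pvStepDict
theorem pv_main (l : List String) :
    ∀ (p : List String) (d : PySem.Dict String (List String)),
    l.foldl pvStepA (d.keys, p, d) =
      (((l.map (fun i => (PySem.Str.splitMax? i "." 1).getD [])).foldl pvStepDict d).keys,
       PySem.Set.update p ((l.map (fun i => (PySem.Str.splitMax? i "." 1).getD [])).filterMap pvSnd?),
       (l.map (fun i => (PySem.Str.splitMax? i "." 1).getD [])).foldl pvStepDict d) := by
  induction l with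
  | nil => intro p d; simp [PySem.Set.update]
  | cons i l ih =>
      intro p d
      simp only [List.foldl_cons, List.map_cons, List.filterMap_cons]
      have hstep : pvStepA (d.keys, p, d) i =
          ((pvStepDict d ((PySem.Str.splitMax? i "." 1).getD [])).keys,
           (match pvSnd? ((PySem.Str.splitMax? i "." 1).getD []) with
            | some pr => PySem.Set.add p pr
            | none => p),
           pvStepDict d ((PySem.Str.splitMax? i "." 1).getD [])) := by
        simp only [pvStepA]
        match h : PySem.Str.splitMax? i "." 1 with
        | none => simp [pvStepDict, pvSnd?]
        | some [] => simp [pvStepDict, pvSnd?]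
        | some [a] => simp [pvStepDict, pvSnd?]
        | some (a :: b :: c :: r) => simp [pvStepDict, pvSnd?]
        | some [a, b] =>
            simp only [Option.getD_some]
            rw [pv_keys_stepDict]
            simp [pvStepDict, pvSnd?]
      rw [hstep]
      match hs : pvSnd? ((PySem.Str.splitMax? i "." 1).getD []) with
      | some pr =>
          rw [ih (PySem.Set.add p pr)]
          simp [PySem.Set.update]
      | none =>
          rw [ih p]

-- keys of A's dict fold: the fst components, deduplicated in encounter order
theorem pv_keys_fold (P : List (List String)) :
    ∀ (d : PySem.Dict String (List String)),
    (P.foldl pvStepDict d).keys = PySem.Set.update d.keys (P.filterMap pvFst?) := by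
  induction P with
  | nil => intro d; simp [PySem.Set.update]
  | cons pr P ih =>
      intro d
      simp only [List.foldl_cons, List.filterMap_cons]
      rw [ih, pv_keys_stepDict]
      match pr with
      | [] => rfl
      | [_] => rfl
      | t :: p :: q :: r => rfl
      | [t, p] => simp [pvFst?, PySem.Set.update_cons]

-- per-key lookup in A's dict fold: the selected prot ids, as a set
theorem pv_getD_fold (P : List (List String)) (t : String) :
    ∀ (d : PySem.Dict String (List String)),
    (P.foldl pvStepDict d).getD t [] = PySem.Set.update (d.getD t []) (P.filterMap (pvSel t)) := by
  induction P with
  | nil => intro d; simp [PySem.Set.update]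
  | cons pr P ih =>
      intro d
      simp only [List.foldl_cons, List.filterMap_cons]
      rw [ih]
      match pr with
      | [] => rfl
      | [_] => rfl
      | t2 :: p :: q :: r => rfl
      | [t2, p] =>
          simp only [pvStepDict, pvSel]
          by_cases h : t2 = t
          · subst h
            simp [PySem.Dict.getD_insert_self, PySem.Set.update_cons]
          · simp [PySem.Dict.getD_insert, h, Ne.symm h]

-- ===== VERDICT (by name: the statement is the Claim_ definition above) =====
theorem process_tax_prot_ids_spec : Claim_equal_process_tax_prot_ids := by
  intro l _ _
  unfold Spec_process_tax_prot_ids process_tax_prot_ids process_tax_prot_ids_alt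
  have h0 : (PySem.Dict.empty : PySem.Dict String (List String)).keys = [] := rfl
  have hmain := pv_main l [] PySem.Dict.empty
  rw [h0] at hmain
  rw [hmain]
  -- notation for the split pairs and the two dicts
  set P := l.map (fun i => (PySem.Str.splitMax? i "." 1).getD []) with hP
  set DA := P.foldl pvStepDict PySem.Dict.empty with hDA
  set DB := (PySem.List.dedup (P.filterMap pvFst?)).foldl
      (fun d t => d.insert t (PySem.Set.ofList (P.filterMap (pvSel t)))) PySem.Dict.empty with hDB
  have hkeysA : DA.keys = PySem.Set.ofList (P.filterMap pvFst?) := by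
    rw [hDA, pv_keys_fold]; rw [h0]; exact PySem.Set.update_nil_left _
  have hnodA : DA.keys.Nodup := by rw [hkeysA]; exact PySem.Set.nodup_ofList _
  have htaxes : PySem.List.dedup (P.filterMap pvFst?) = PySem.Set.ofList (P.filterMap pvFst?) := by
    simp
  have hitemsB : DB.items =
      (PySem.List.dedup (P.filterMap pvFst?)).map
        (fun t => (t, PySem.Set.ofList (P.filterMap (pvSel t)))) := by
    rw [hDB]
    have := PySem.Dict.items_foldl_insert_fresh
      (l := PySem.List.dedup (P.filterMap pvFst?))
      (k := fun t => t)
      (v := fun t => PySem.Set.ofList (P.filterMap (pvSel t)))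
      (d := PySem.Dict.empty)
      (by intro a _; exact PySem.Dict.contains_empty a)
      (by simp)
    simpa using this
  have hitemsA : DA.items =
      (PySem.List.dedup (P.filterMap pvFst?)).map
        (fun t => (t, PySem.Set.ofList (P.filterMap (pvSel t)))) := by
    rw [PySem.Dict.items_eq_map_keys DA hnodA []]
    rw [hkeysA, htaxes]
    refine List.map_congr_left ?_
    intro t _
    rw [hDA, pv_getD_fold]
    have : (PySem.Dict.empty : PySem.Dict String (List String)).getD t [] = [] := rfl
    rw [this]
    exact congrArg _ (PySem.Set.update_nil_left _)
  have hitems : DA.items = DB.items := by rw [hitemsA, hitemsB]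
  have hkeys : DA.keys = DB.keys := by
    simp only [PySem.Dict.keys]; rw [hitems]
  refine Prod.ext hkeys (Prod.ext ?_ hitems)
  simp [PySem.Set.update_nil_left]
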